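-- pv_equiv track=rewrite | github.com/ridhiisinghh/69-goals | 165.py | exact_count
-- ===== SOURCE A (Python) =====
-- def exact_count(para,n):
--     L= para.split(" ")
--     dict = {}
--     for i in range(0,len(L)):
--         if(L[i] not in dict):
--             dict[L[i]] = 1
--         else:
--             dict[L[i]]+=1
--     val = dict.values()
--     if(n in val):
--         return True
--     else:
--         return False
-- ===== SOURCE B (Python) =====
-- def exact_count(para, n):
--     words = sorted(para.split(" "))
--     prev = words[0]
--     run = 1
--     for w in words[1:]:
--         if w == prev:
--             run += 1
--         else:
--             if run == n:
--                 return True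
--             prev = w
--             run = 1
--     return run == n
-- ===== Notes on version B (the rewrite author's own statement) =====
-- stated objective: alternative
-- what changed: Replaces the dict-of-frequencies plus membership test in values by sorting the split words and scanning run lengths of adjacent equal words with early exit.
import Mathlib
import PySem

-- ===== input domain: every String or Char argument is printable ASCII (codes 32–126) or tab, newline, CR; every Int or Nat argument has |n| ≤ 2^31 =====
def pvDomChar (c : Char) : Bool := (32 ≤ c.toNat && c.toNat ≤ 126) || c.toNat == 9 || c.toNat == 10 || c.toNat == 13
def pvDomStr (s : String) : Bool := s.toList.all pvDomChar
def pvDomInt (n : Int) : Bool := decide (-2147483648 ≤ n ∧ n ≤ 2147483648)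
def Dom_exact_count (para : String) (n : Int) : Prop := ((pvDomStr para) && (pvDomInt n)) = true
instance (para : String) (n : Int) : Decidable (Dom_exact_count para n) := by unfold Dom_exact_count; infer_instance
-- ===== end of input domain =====

-- B: instead of A's frequency dict and membership test over its values, sort the split
-- words and run-length scan adjacent equal words (alternative algorithm, not claimed faster).

-- ===== PORT A =====
def exact_count (para : String) (n : Int) : Bool :=
  let L := (PySem.Str.split? para " ").getD []   -- sep " " ≠ "", so split? is some: exact
  let d := (PySem.List.pyRange 0 (L.length : Int) 1).foldl
    (fun d i =>
      -- L[i]: i ranges over range(0, len(L)), always in range, so pyGetD is exact here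
      let w := PySem.List.pyGetD L i ""
      if d.contains w = false then d.insert w 1
      else d.insert w (d.getD w 0 + 1))
    PySem.Dict.empty
  let val := d.values
  if val.contains n then true else false

-- ===== PORT B =====
def pvRunLoop (n : Int) (prev : String) (run : Int) : List String → Bool
  | [] => run == n
  | w :: ws =>
      if w == prev then pvRunLoop n prev (run + 1) ws
      else if run == n then true else pvRunLoop n w 1 ws

def exact_count_alt (para : String) (n : Int) : Bool :=
  let words := PySem.List.sorted ((PySem.Str.split? para " ").getD []) (fun x => x) false
  -- words[0]: split(" ") always yields at least one piece, so words is nonempty and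
  -- indexing is exact; the [] branch is unreachable
  match words with
  | [] => false
  | w0 :: rest => pvRunLoop n w0 1 rest

-- ===== PRECONDITION & SPEC =====
def Spec_exact_count (para : String) (n : Int) (out : Bool) : Prop := out = exact_count_alt para n
instance (para : String) (n : Int) (out : Bool) : Decidable (Spec_exact_count para n out) := by unfold Spec_exact_count; infer_instance

-- ===== CLAIM (what is proved, stated in full; the proofs are below) =====
def Claim_equal_exact_count : Prop := ∀ (para : String) (n : Int), Dom_exact_count para n → Spec_exact_count para n (exact_count para n)

-- ===== LEMMAS AND PROOFS =====

-- the two insert branches of A's loop coincide with the unconditional counting insert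
theorem pv_foldl_branch_eq (L : List String) (d : PySem.Dict String Int) :
    L.foldl (fun d w => if d.contains w = false then d.insert w 1
                        else d.insert w (d.getD w 0 + 1)) d
    = L.foldl (fun d w => d.insert w (d.getD w 0 + 1)) d := by
  induction L generalizing d with
  | nil => rfl
  | cons w ws ih =>
      simp only [List.foldl_cons]
      by_cases h : d.contains w = false
      · have h0 : d.getD w 0 = 0 := PySem.Dict.getD_of_not_contains d 0 h
        rw [if_pos h, h0]
        norm_num [ih]
      · rw [if_neg h, ih]

-- A returns (counter L).values.contains n, i.e. some word's count equals n
theorem pv_A_char (para : String) (n : Int) :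
    exact_count para n
      = decide (∃ v ∈ (PySem.Str.split? para " ").getD [],
          (((PySem.Str.split? para " ").getD []).count v : Int) = n) := by
  unfold exact_count
  dsimp only
  have hfold :
      List.foldl
        (fun d i =>
          if d.contains (PySem.List.pyGetD ((PySem.Str.split? para " ").getD []) i "") = false then
            d.insert (PySem.List.pyGetD ((PySem.Str.split? para " ").getD []) i "") 1
          else
            d.insert (PySem.List.pyGetD ((PySem.Str.split? para " ").getD []) i "")
              (d.getD (PySem.List.pyGetD ((PySem.Str.split? para " ").getD []) i "") 0 + 1))
        (PySem.Dict.empty : PySem.Dict String Int)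
        (PySem.List.pyRange 0 ((((PySem.Str.split? para " ").getD []).length : Int)))
      = List.foldl (fun d w => if d.contains w = false then d.insert w 1
                               else d.insert w (d.getD w 0 + 1))
          (PySem.Dict.empty : PySem.Dict String Int) ((PySem.Str.split? para " ").getD []) :=
    PySem.List.foldl_pyRange_zero_pyGetD' ((PySem.Str.split? para " ").getD []) ""
      (fun d w => if d.contains w = false then d.insert w 1
                  else d.insert w (d.getD w 0 + 1)) (PySem.Dict.empty : PySem.Dict String Int)
  rw [hfold]
  rw [pv_foldl_branch_eq, PySem.Dict.foldl_insert_getD_add_one_eq_counter]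
  rw [PySem.Dict.values_eq_map_keys _ (PySem.Dict.nodup_keys_counter _) 0]
  simp [PySem.Dict.keys_counter, PySem.Dict.getD_counter, PySem.Set.mem_ofList, eq_comm]

-- run-length scan over a sorted tail: spec of pvRunLoop
theorem pv_runLoop_spec (n : Int) (ws : List String) (prev : String) (run : Int)
    (h : (prev :: ws).Pairwise (· ≤ ·)) :
    (pvRunLoop n prev run ws = true
      ↔ run + (ws.count prev : Int) = n ∨ ∃ v ∈ ws, v ≠ prev ∧ (ws.count v : Int) = n) := by
  induction ws generalizing prev run with
  | nil => simp [pvRunLoop]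
  | cons w ws' ih =>
      rcases List.pairwise_cons.mp h with ⟨hprev, hw⟩
      by_cases hwp : w = prev
      · subst hwp
        rw [pvRunLoop, if_pos (by simp)]
        rw [ih w (run + 1) hw]
        rw [List.count_cons_self]
        constructor
        · rintro (h1 | ⟨v, hv, hvp, hc⟩)
          · left; push_cast at h1 ⊢; omega
          · exact Or.inr ⟨v, List.mem_cons_of_mem _ hv, hvp,
              by rw [List.count_cons_of_ne (Ne.symm hvp)]; exact hc⟩
        · rintro (h1 | ⟨v, hv, hvp, hc⟩)
          · left; push_cast at h1 ⊢; omega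
          · rcases List.mem_cons.mp hv with rfl | hv'
            · exact absurd rfl hvp
            · exact Or.inr ⟨v, hv', hvp,
                by rw [List.count_cons_of_ne (Ne.symm hvp)] at hc; exact hc⟩
      · have hprevw : prev ≤ w := hprev w (List.mem_cons_self ..)
        have hnotin : prev ∉ ws' := by
          intro hmem
          have h1 : w ≤ prev := (List.pairwise_cons.mp hw).1 prev hmem
          exact hwp (le_antisymm h1 hprevw)
        rw [pvRunLoop, if_neg (by simp; exact fun h => hwp h)]
        have hpw : prev ≠ w := fun h => hwp h.symm
        have hcnt : (w :: ws').count prev = 0 := by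
          rw [List.count_cons_of_ne (Ne.symm hpw), List.count_eq_zero]
          exact hnotin
        by_cases hrn : run = n
        · rw [if_pos (by simpa using hrn)]
          simp [hcnt, hrn]
        · rw [if_neg (by simpa using hrn)]
          rw [ih w 1 hw]
          rw [hcnt]
          constructor
          · rintro (h1 | ⟨v, hv, hvw, hc⟩)
            · refine Or.inr ⟨w, List.mem_cons_self .., hwp, ?_⟩
              rw [List.count_cons_self]; push_cast at h1 ⊢; omega
            · refine Or.inr ⟨v, List.mem_cons_of_mem _ hv, ?_, ?_⟩
              · intro h; exact hnotin (h ▸ hv)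
              · rw [List.count_cons_of_ne (Ne.symm hvw)]; exact hc
          · rintro (h1 | ⟨v, hv, hvp, hc⟩)
            · exact absurd (by push_cast at h1; omega) hrn
            · rcases List.mem_cons.mp hv with rfl | hv'
              · left
                rw [List.count_cons_self] at hc
                push_cast at hc ⊢; omega
              · by_cases hvw : v = w
                · left
                  subst hvw
                  rw [List.count_cons_self] at hc
                  push_cast at hc ⊢; omega
                · exact Or.inr ⟨v, hv', hvw,
                    by rw [List.count_cons_of_ne (Ne.symm hvw)] at hc; exact hc⟩

-- grouping a sorted cons cell: the runLoop disjunction is 'some count equals n'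
theorem pv_cons_count_iff (n : Int) (w0 : String) (rest : List String) :
    (1 + (rest.count w0 : Int) = n ∨ ∃ v ∈ rest, v ≠ w0 ∧ (rest.count v : Int) = n)
      ↔ (∃ v ∈ w0 :: rest, (((w0 :: rest).count v : Int)) = n) := by
  constructor
  · rintro (h1 | ⟨v, hv, hvw, hc⟩)
    · exact ⟨w0, List.mem_cons_self .., by rw [List.count_cons_self]; push_cast at h1 ⊢; omega⟩
    · exact ⟨v, List.mem_cons_of_mem _ hv, by rw [List.count_cons_of_ne (Ne.symm hvw)]; exact hc⟩
  · rintro ⟨v, hv, hc⟩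
    rcases List.mem_cons.mp hv with rfl | hv'
    · left; rw [List.count_cons_self] at hc; push_cast at hc ⊢; omega
    · by_cases hvw : v = w0
      · left; subst hvw; rw [List.count_cons_self] at hc; push_cast at hc ⊢; omega
      · exact Or.inr ⟨v, hv', hvw, by rw [List.count_cons_of_ne (Ne.symm hvw)] at hc; exact hc⟩

-- B returns whether some word's count in the split list equals n
theorem pv_B_char (para : String) (n : Int) :
    exact_count_alt para n
      = decide (∃ v ∈ (PySem.Str.split? para " ").getD [],
          (((PySem.Str.split? para " ").getD []).count v : Int) = n) := by
  unfold exact_count_alt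
  dsimp only
  have hperm : (PySem.List.sorted ((PySem.Str.split? para " ").getD []) (fun x => x) false).Perm
      ((PySem.Str.split? para " ").getD []) := PySem.List.sorted_perm ..
  have hpw : (PySem.List.sorted ((PySem.Str.split? para " ").getD []) (fun x => x) false).Pairwise
      (· ≤ ·) := PySem.List.sorted_pairwise ..
  have hgoal : (∃ v ∈ (PySem.Str.split? para " ").getD [],
        (((PySem.Str.split? para " ").getD []).count v : Int) = n)
      ↔ (∃ v ∈ PySem.List.sorted ((PySem.Str.split? para " ").getD []) (fun x => x) false,
        ((PySem.List.sorted ((PySem.Str.split? para " ").getD []) (fun x => x) false).count v : Int) = n) := by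
    constructor
    · rintro ⟨v, hv, hc⟩; exact ⟨v, hperm.mem_iff.mpr hv, by rw [hperm.count_eq]; exact hc⟩
    · rintro ⟨v, hv, hc⟩; exact ⟨v, hperm.mem_iff.mp hv, by rw [← hperm.count_eq v]; exact hc⟩
  rw [Bool.eq_iff_iff, decide_eq_true_eq, hgoal]
  revert hpw
  cases hse : PySem.List.sorted ((PySem.Str.split? para " ").getD []) (fun x => x) false with
  | nil => simp
  | cons w0 rest =>
      intro hpw
      rw [pv_runLoop_spec n rest w0 1 hpw]
      exact pv_cons_count_iff n w0 rest

-- ===== VERDICT (by name: the statement is the Claim_ definition above) =====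
theorem exact_count_spec : Claim_equal_exact_count := by
  intro para n _
  unfold Spec_exact_count
  rw [pv_A_char, pv_B_char]
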